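-- pv_equiv track=rewrite | github.com/deltacluse/Tkinter_Poker | src/script/jk.py | top_score
-- ===== SOURCE A (Python) =====
-- def top_score(top_list):
--     max_number = 0
--     for i in top_list:
--         if i == 1:
--             return 14
--         else:
--             if max_number < i:
--                 max_number = i
--     return max_number
-- ===== SOURCE B (Python) =====
-- def _scan(cards, lo, hi):
--     # tournament (divide and conquer) over cards[lo:hi]
--     if lo == hi:
--         return (False, 0)
--     if hi - lo == 1:
--         x = cards[lo]
--         return (x == 1, x if x > 0 else 0)
--     mid = (lo + hi) // 2
--     a1, m1 = _scan(cards, lo, mid)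
--     a2, m2 = _scan(cards, mid, hi)
--     return (a1 or a2, m1 if m1 >= m2 else m2)
--
-- def top_score(top_list):
--     ace, mx = _scan(top_list, 0, len(top_list))
--     return 14 if ace else mx
-- ===== Notes on version B (the rewrite author's own statement) =====
-- stated objective: alternative
-- what changed: Replaces A's sequential early-exit accumulator loop by a divide-and-conquer tournament over index ranges that combines (ace-seen, max floored at 0) pairs from the two halves and decides the result once at the end.
import Mathlib
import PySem

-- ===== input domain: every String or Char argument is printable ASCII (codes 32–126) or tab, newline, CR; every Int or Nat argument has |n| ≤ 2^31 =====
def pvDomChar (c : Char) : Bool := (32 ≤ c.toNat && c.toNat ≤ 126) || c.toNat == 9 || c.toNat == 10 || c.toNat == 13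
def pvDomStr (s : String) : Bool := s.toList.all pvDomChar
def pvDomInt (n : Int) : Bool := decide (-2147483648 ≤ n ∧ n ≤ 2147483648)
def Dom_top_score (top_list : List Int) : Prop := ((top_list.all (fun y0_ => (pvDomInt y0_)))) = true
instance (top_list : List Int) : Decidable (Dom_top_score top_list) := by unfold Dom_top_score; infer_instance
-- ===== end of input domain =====

-- B replaces A's sequential early-exit loop by a divide-and-conquer tournament over index ranges combining (ace-flag, max-floored-at-0) pairs; objective: alternative.

-- ===== PORT A =====
-- A's loop with early return, transliterated as recursion over the list carrying max_number
def top_score_go (l : List Int) (max_number : Int) : Int :=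
  match l with
  | [] => max_number
  | i :: t => if i == 1 then 14 else top_score_go t (if max_number < i then i else max_number)

def top_score (top_list : List Int) : Int := top_score_go top_list 0

-- ===== PORT B =====
-- Source B's _scan: divide and conquer over cards[lo:hi].  The fuel parameter only makes the
-- recursion structurally total (every reached call has hi - lo <= fuel); the index read uses
-- getD 0 as a totality guard, the index is always in range on reached calls.
def top_score_scan (cards : List Int) (fuel lo hi : Nat) : Bool × Int :=
  match fuel with
  | 0 => (false, 0)
  | Nat.succ f =>
    if lo = hi then (false, 0)
    else if hi - lo = 1 then
      let x := (PySem.List.pyGet? cards (lo : Int)).getD 0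
      (decide (x = 1), if x > 0 then x else 0)
    else
      let mid := (lo + hi) / 2
      let r1 := top_score_scan cards f lo mid
      let r2 := top_score_scan cards f mid hi
      (r1.1 || r2.1, if r1.2 ≥ r2.2 then r1.2 else r2.2)

def top_score_alt (top_list : List Int) : Int :=
  let r := top_score_scan top_list top_list.length 0 top_list.length
  if r.1 then 14 else r.2

-- ===== PRECONDITION & SPEC =====
def Spec_top_score (top_list : List Int) (out : Int) : Prop := out = top_score_alt top_list
instance (top_list : List Int) (out : Int) : Decidable (Spec_top_score top_list out) := by unfold Spec_top_score; infer_instance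

-- ===== CLAIM (what is proved, stated in full; the proofs are below) =====
def Claim_equal_top_score : Prop := ∀ (top_list : List Int), Dom_top_score top_list → Spec_top_score top_list (top_score top_list)

-- ===== LEMMAS AND PROOFS =====
-- reference pair: (ace seen, max of elements floored at 0), structural on the list
def specPair : List Int → Bool × Int
  | [] => (false, 0)
  | x :: t =>
    let r := specPair t
    (decide (x = 1) || r.1, max (if x > 0 then x else 0) r.2)

theorem specPair_nonneg (l : List Int) : 0 ≤ (specPair l).2 := by
  induction l with
  | nil => simp [specPair]
  | cons x t ih =>
    simp only [specPair]
    exact le_trans ih (le_max_right _ _)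

theorem specPair_append (s t : List Int) :
    specPair (s ++ t) = ((specPair s).1 || (specPair t).1, max (specPair s).2 (specPair t).2) := by
  induction s with
  | nil => simp [specPair, max_eq_right (specPair_nonneg t)]
  | cons x s ih => simp [specPair, ih, Bool.or_assoc, max_assoc]

theorem scan_eq (cards : List Int) : ∀ (fuel lo hi : Nat), lo ≤ hi → hi ≤ cards.length →
    hi - lo ≤ fuel →
    top_score_scan cards fuel lo hi = specPair ((cards.drop lo).take (hi - lo)) := by
  intro fuel
  induction fuel with
  | zero =>
    intro lo hi hlo _ hf
    have : lo = hi := by omega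
    simp [top_score_scan, this, specPair]
  | succ f ih =>
    intro lo hi hlo hhi hf
    by_cases heq : lo = hi
    · simp [top_score_scan, heq, specPair]
    · by_cases h1 : hi - lo = 1
      · have hlt : lo < cards.length := by omega
        have hseg : (cards.drop lo).take (hi - lo) = [cards[lo]] := by
          rw [h1, List.take_one]
          simp [List.head?_drop, List.getElem?_eq_getElem hlt]
        rw [hseg]
        simp only [top_score_scan, if_neg heq, if_pos h1, specPair,
          PySem.List.pyGet?_natCast, List.getElem?_eq_getElem hlt, Option.getD_some,
          Prod.mk.injEq, Bool.or_false, true_and, max_def]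
        split_ifs <;> omega
      · have hmlt : (lo + hi) / 2 < hi := Nat.div_lt_of_lt_mul (by omega)
        have hmgt : lo + 1 ≤ (lo + hi) / 2 := (Nat.le_div_iff_mul_le (by omega)).mpr (by omega)
        simp only [top_score_scan, if_neg heq, if_neg h1]
        generalize hmid : (lo + hi) / 2 = mid at hmlt hmgt ⊢
        have hA : mid - lo ≤ f := by omega
        have hB : hi - mid ≤ f := by omega
        have hseg : (cards.drop lo).take (hi - lo) =
            (cards.drop lo).take (mid - lo) ++ (cards.drop mid).take (hi - mid) := by
          have e1 : hi - lo = (mid - lo) + (hi - mid) := by omega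
          have e2 : lo + (mid - lo) = mid := by omega
          rw [e1, List.take_add, List.drop_drop, e2]
        rw [hseg, specPair_append,
            ih lo mid (by omega) (by omega) hA, ih mid hi (by omega) hhi hB]
        simp only [Prod.mk.injEq, true_and, max_def]
        split_ifs <;> omega

theorem max3_shift (m i r : Int) (hm : 0 ≤ m) :
    max (max m i) r = max m (max (if i > 0 then i else 0) r) := by
  simp only [max_def]
  split_ifs <;> omega

theorem go_eq (l : List Int) : ∀ (m : Int), 0 ≤ m →
    top_score_go l m = if (specPair l).1 then 14 else max m (specPair l).2 := by
  induction l with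
  | nil =>
    intro m hm
    simp [top_score_go, specPair, max_eq_left hm]
  | cons i t ih =>
    intro m hm
    by_cases h1 : i = 1
    · simp [top_score_go, specPair, h1]
    · have hmax : (if m < i then i else m) = max m i := by
        rcases lt_or_ge m i with h | h
        · simp [h, max_eq_right (le_of_lt h)]
        · simp [not_lt.mpr h, max_eq_left h]
      have hmi : (0:Int) ≤ max m i := le_trans hm (le_max_left m i)
      simp only [top_score_go, beq_iff_eq, hmax, ih _ hmi, specPair,
        h1, decide_false, Bool.false_or]
      rcases Bool.eq_false_or_eq_true (specPair t).1 with hb | hb <;>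
        simp [hb, max3_shift m i _ hm]

-- ===== VERDICT (by name: the statement is the Claim_ definition above) =====
theorem top_score_spec : Claim_equal_top_score := by
  intro l _
  unfold Spec_top_score top_score top_score_alt
  rw [scan_eq l l.length 0 l.length (Nat.zero_le _) le_rfl (by omega)]
  simp only [List.drop_zero, Nat.sub_zero, List.take_length]
  rw [go_eq l 0 le_rfl]
  rcases Bool.eq_false_or_eq_true (specPair l).1 with hb | hb <;>
    simp [hb, max_eq_right (specPair_nonneg l)]
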